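-- pv_equiv track=rewrite | github.com/myrlagksruf/jungol | python/3085.사탕 게임.py | checkcol
-- ===== SOURCE A (Python) =====
-- def checkcol(arr, ind):
--     m = 0
--     cur = ''
--     curm = 0
--     for i in range(len(arr)):
--         if cur == arr[ind][i]:
--             curm += 1
--         else:
--             cur = arr[ind][i]
--             curm = 1
--         m = max(m, curm)
--     return m
-- ===== SOURCE B (Python) =====
-- def checkcol(arr, ind):
--     seq = [arr[ind][i] for i in range(len(arr))]
--
--     def runs(s):
--         if not s:
--             return []
--         k = 1
--         while k < len(s) and s[k] == s[0]:
--             k += 1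
--         return [k] + runs(s[k:])
--
--     return max(runs(seq), default=0)
-- ===== Notes on version B (the rewrite author's own statement) =====
-- stated objective: alternative
-- what changed: B extracts the examined column as an explicit list, splits it into maximal runs of equal adjacent elements (a recursively built list of run lengths) and returns the largest run length, instead of threading a running (prev, counter, max) state through one loop.
import Mathlib
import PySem

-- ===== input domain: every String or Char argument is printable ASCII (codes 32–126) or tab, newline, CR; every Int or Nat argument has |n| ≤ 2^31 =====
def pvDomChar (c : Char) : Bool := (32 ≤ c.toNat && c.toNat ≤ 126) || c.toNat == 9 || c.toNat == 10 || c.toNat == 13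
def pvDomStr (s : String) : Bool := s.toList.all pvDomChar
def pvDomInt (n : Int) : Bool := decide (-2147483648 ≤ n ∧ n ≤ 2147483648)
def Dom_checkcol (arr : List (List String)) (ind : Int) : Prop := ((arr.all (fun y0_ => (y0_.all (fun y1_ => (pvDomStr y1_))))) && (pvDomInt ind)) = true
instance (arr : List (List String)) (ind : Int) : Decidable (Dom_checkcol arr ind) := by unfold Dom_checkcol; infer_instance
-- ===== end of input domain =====

-- B replaces A's threaded (prev, counter, max) loop state by an explicit run-length
-- decomposition of the examined column (list of maximal-run lengths, then max); alternative, not faster.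


-- ===== PORT A =====
-- loop body of A: state (m, cur, curm), next element v
def stepA (s : Int × String × Int) (v : String) : Int × String × Int :=
  let (m, cur, curm) := s
  if cur == v then (max m (curm + 1), cur, curm + 1)
  else (max m 1, v, 1)

def checkcol (arr : List (List String)) (ind : Int) : Int :=
  ((PySem.List.pyRange 0 arr.length 1).foldl
    (fun s i => stepA s (PySem.List.pyGetD (PySem.List.pyGetD arr ind []) i ""))
    (0, "", 0)).1

-- ===== PORT B =====
-- runs(s): length of the maximal equal prefix after the head …
def countPrefix (x : String) : List String → Nat
  | y :: t => if y == x then countPrefix x t + 1 else 0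
  | [] => 0

-- … then the list of run lengths, built recursively
def runsB : List String → List Int
  | [] => []
  | x :: t =>
    let c := countPrefix x t
    ((c : Int) + 1) :: runsB (t.drop c)
termination_by s => s.length
decreasing_by simp

def checkcol_alt (arr : List (List String)) (ind : Int) : Int :=
  let seq := (PySem.List.pyRange 0 arr.length 1).map
    (fun i => PySem.List.pyGetD (PySem.List.pyGetD arr ind []) i "")
  (runsB seq).foldl max 0   -- max(…, default=0)

-- ===== PRECONDITION & SPEC =====
-- Pre_ excludes exactly the inputs where A raises IndexError (arr nonempty with ind out of
-- range, or the selected row shorter than len(arr)); A returns on everything admitted.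
def Pre_checkcol (arr : List (List String)) (ind : Int) : Prop :=
  arr = [] ∨ (PySem.Raise.InRange arr.length ind ∧
              arr.length ≤ (PySem.List.pyGetD arr ind []).length)
instance (arr : List (List String)) (ind : Int) : Decidable (Pre_checkcol arr ind) := by unfold Pre_checkcol; infer_instance

def pvWitness_checkcol : List (List String) × Int := ([["a", "b"], ["b", "b"]], 1)

def Spec_checkcol (arr : List (List String)) (ind : Int) (out : Int) : Prop := out = checkcol_alt arr ind
instance (arr : List (List String)) (ind : Int) (out : Int) : Decidable (Spec_checkcol arr ind out) := by unfold Spec_checkcol; infer_instance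

-- ===== CLAIM (what is proved, stated in full; the proofs are below) =====
def Claim_equal_checkcol : Prop := ∀ (arr : List (List String)) (ind : Int), Dom_checkcol arr ind → Pre_checkcol arr ind → Spec_checkcol arr ind (checkcol arr ind)

-- ===== LEMMAS AND PROOFS =====

-- equation lemmas for the well-founded definition runsB
theorem runsB_nil : runsB [] = [] := by rw [runsB.eq_def]
theorem runsB_cons (x : String) (t : List String) :
    runsB (x :: t) = ((countPrefix x t : Int) + 1) :: runsB (t.drop (countPrefix x t)) := by
  rw [runsB.eq_def]

-- after the maximal equal prefix, the next element (if any) differs from x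
theorem countPrefix_drop (x : String) (t : List String) :
    ∀ y rest, t.drop (countPrefix x t) = y :: rest → (x == y) = false := by
  induction t with
  | nil => intro y rest h; simp at h
  | cons z t ih =>
    intro y rest h
    by_cases hz : (z == x) = true
    · simp [countPrefix, hz, List.drop_succ_cons] at h
      exact ih y rest h
    · have hz' : (z == x) = false := by simpa using hz
      have hne : z ≠ x := by simpa using hz'
      simp [countPrefix, hz'] at h
      rcases h with ⟨h1, -⟩
      subst h1
      exact beq_eq_false_iff_ne.mpr (Ne.symm hne)

-- consuming one maximal run with stepA
theorem run_lemma (t : List String) (x : String) :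
    ∀ m curm : Int, curm ≤ m →
    List.foldl stepA (m, x, curm) t =
      List.foldl stepA (max m (curm + countPrefix x t), x, curm + countPrefix x t)
        (t.drop (countPrefix x t)) := by
  induction t with
  | nil =>
    intro m curm h
    simp [countPrefix]
    omega
  | cons y t ih =>
    intro m curm h
    by_cases hy : (y == x) = true
    · have hxy : x = y := (eq_of_beq hy).symm
      have hc : countPrefix x (y :: t) = countPrefix x t + 1 := by simp [countPrefix, hy]
      rw [hc, List.foldl_cons, List.drop_succ_cons]
      have hstep : stepA (m, x, curm) y = (max m (curm + 1), x, curm + 1) := by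
        simp [stepA, hxy]
      rw [hstep, ih (max m (curm + 1)) (curm + 1) (le_max_right _ _)]
      have h0 : (0:Int) ≤ (countPrefix x t : Int) := Int.natCast_nonneg _
      congr 1
      push_cast
      simp only [Prod.mk.injEq]
      exact ⟨by omega, trivial, by omega⟩
    · have hy' : (y == x) = false := by simpa using hy
      simp only [countPrefix, hy', if_neg, Bool.false_eq_true, not_false_iff]
      simp only [Nat.cast_zero, add_zero, List.drop_zero]
      have : max m curm = m := by omega
      rw [this]

-- the core correspondence, by strong induction on the length of the tail
theorem mcons : ∀ (n : Nat) (t : List String), t.length ≤ n → ∀ (x : String) (m : Int), 0 ≤ m →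
    (List.foldl stepA (max m 1, x, 1) t).1 = (runsB (x :: t)).foldl max m := by
  intro n
  induction n with
  | zero =>
    intro t ht x m hm
    have : t = [] := List.eq_nil_of_length_eq_zero (Nat.le_zero.mp ht)
    subst this
    simp [runsB_cons, runsB_nil, countPrefix]
  | succ n ih =>
    intro t ht x m hm
    have hcpos : (0:Int) ≤ (countPrefix x t : Int) := Int.natCast_nonneg _
    rw [run_lemma t x (max m 1) 1 (le_max_right _ _)]
    have hmax : max (max m 1) (1 + (countPrefix x t : Int)) = max m ((countPrefix x t : Int) + 1) := by omega
    have h1 : (1 : Int) + (countPrefix x t : Int) = (countPrefix x t : Int) + 1 := by omega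
    rw [hmax, h1, runsB_cons, List.foldl_cons]
    rcases hdrop : t.drop (countPrefix x t) with _ | ⟨y, rest⟩
    · simp [runsB_nil]
    · have hxy : (x == y) = false := countPrefix_drop x t y rest hdrop
      rw [List.foldl_cons]
      have hstep : stepA (max m ((countPrefix x t : Int) + 1), x, (countPrefix x t : Int) + 1) y
                 = (max (max m ((countPrefix x t : Int) + 1)) 1, y, 1) := by
        simp [stepA, hxy]
      rw [hstep]
      have hlen : rest.length ≤ n := by
        have h2 := List.length_drop (l := t) (i := countPrefix x t)
        rw [hdrop] at h2
        simp at h2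
        omega
      rw [ih rest hlen y (max m ((countPrefix x t : Int) + 1)) (by omega)]

-- both ports reduced to the same extracted column
theorem pure_eq (seq : List String) :
    (List.foldl stepA (0, "", 0) seq).1 = (runsB seq).foldl max 0 := by
  rcases seq with _ | ⟨x, t⟩
  · simp [runsB_nil]
  · rw [List.foldl_cons]
    have hstep : stepA ((0 : Int), "", (0 : Int)) x = (max 0 1, x, 1) := by
      by_cases hx : ("" : String) = x
      · simp [stepA, ← hx]
      · have : (("" : String) == x) = false := by simpa using hx
        simp [stepA, this]
    rw [hstep]
    exact mcons t.length t le_rfl x 0 le_rfl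

-- ===== VERDICT (by name: the statement is the Claim_ definition above) =====
theorem checkcol_spec : Claim_equal_checkcol := by
  intro arr ind _ _
  unfold Spec_checkcol checkcol checkcol_alt
  rw [← List.foldl_map]
  exact pure_eq _
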